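-- pv_equiv track=rewrite | github.com/wangsun39/leetcode | allcode/2200-2299/2216minDeletion.py | minDeletion1
-- ===== SOURCE A (Python) =====
-- from typing import List
--
-- def minDeletion1(nums: List[int]) -> int:
--     N = len(nums)
--     if N == 0:
--         return 0
--     even = True
--     i = 1
--     pre = nums[0]
--     ans = 0
--     while i < N:
--         if even:
--             if nums[i] == pre:
--                 i += 1
--                 ans += 1
--             else:
--                 pre = nums[i]
--                 i += 1
--                 even = not even
--         else:
--             pre = nums[i]
--             i += 1
--             even = not even
--     if (N - ans) % 2 == 1:
--         ans += 1
--     return ans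
-- ===== SOURCE B (Python) =====
-- from typing import List
--
-- def minDeletion1(nums: List[int]) -> int:
--     # Pass 1: run-length encode consecutive equal values.
--     runs = []
--     for x in nums:
--         if runs and runs[-1][0] == x:
--             runs[-1][1] += 1
--         else:
--             runs.append([x, 1])
--     # Pass 2: fold over runs; a run contributes 1 kept element if the kept
--     # length is even so far, otherwise min(L, 2) kept elements.
--     kept = 0
--     for _, L in runs:
--         if kept % 2 == 0:
--             kept += 1
--         else:
--             kept += min(L, 2)
--     kept -= kept % 2
--     return len(nums) - kept
-- ===== Notes on version B (the rewrite author's own statement) =====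
-- stated objective: alternative
-- what changed: B is a staged two-pass algorithm: it first run-length encodes nums into maximal runs of equal values, then folds a kept-count over the runs (a run contributes 1 kept element when the count so far is even, else min(L,2)) and subtracts the even-truncated kept count from len(nums), replacing A's single index loop with the scalar state (pre, even, ans).
import Mathlib
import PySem

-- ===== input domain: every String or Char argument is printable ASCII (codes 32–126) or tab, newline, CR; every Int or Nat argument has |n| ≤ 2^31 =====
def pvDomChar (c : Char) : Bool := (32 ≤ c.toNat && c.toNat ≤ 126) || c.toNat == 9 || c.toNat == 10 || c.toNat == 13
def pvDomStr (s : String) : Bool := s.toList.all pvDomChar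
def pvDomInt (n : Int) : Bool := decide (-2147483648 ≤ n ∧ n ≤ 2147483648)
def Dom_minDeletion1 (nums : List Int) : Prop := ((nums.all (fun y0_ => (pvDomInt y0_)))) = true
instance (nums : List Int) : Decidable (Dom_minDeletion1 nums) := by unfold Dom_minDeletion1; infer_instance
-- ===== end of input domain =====

-- B replaces A's single stateful index loop by two staged passes: run-length
-- encode consecutive equal values, then fold a kept-count over the runs;
-- objective: alternative (same O(n) cost, different algorithmic decomposition).

-- ===== PORT A =====
-- the while loop of A, iterating over the remaining elements nums[i:] with state (even, pre, ans)
def minDeletion1Loop (rest : List Int) (even : Bool) (pre : Int) (ans : Int) : Int :=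
  match rest with
  | [] => ans
  | x :: rest' =>
    if even then
      if x = pre then minDeletion1Loop rest' even pre (ans + 1)
      else minDeletion1Loop rest' (!even) x ans
    else minDeletion1Loop rest' (!even) x ans

def minDeletion1 (nums : List Int) : Int :=
  match nums with
  | [] => 0
  | x :: rest =>
    let ans := minDeletion1Loop rest true x 0
    if ((nums.length : Int) - ans) % 2 == 1 then ans + 1 else ans

-- ===== PORT B =====
-- pass 1, one step: extend the last run if its value equals x, else start a new run
def rleStep (runs : List (Int × Int)) (x : Int) : List (Int × Int) :=
  match runs.getLast? with
  | some (v, c) => if v == x then runs.dropLast ++ [(v, c + 1)] else runs ++ [(x, 1)]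
  | none => [(x, 1)]

-- pass 2, one step: a run contributes 1 kept element at even kept length, else min(L, 2)
def keptStep (kept : Int) (run : Int × Int) : Int :=
  if kept % 2 == 0 then kept + 1 else kept + min run.2 2

def minDeletion1_alt (nums : List Int) : Int :=
  let runs := nums.foldl rleStep []
  let kept := runs.foldl keptStep 0
  let kept := kept - kept % 2
  (nums.length : Int) - kept

-- ===== PRECONDITION & SPEC =====
def Spec_minDeletion1 (nums : List Int) (out : Int) : Prop := out = minDeletion1_alt nums
instance (nums : List Int) (out : Int) : Decidable (Spec_minDeletion1 nums out) := by unfold Spec_minDeletion1; infer_instance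

-- ===== CLAIM =====
def Claim_equal_minDeletion1 : Prop := ∀ (nums : List Int), Dom_minDeletion1 nums → Spec_minDeletion1 nums (minDeletion1 nums)

-- ===== LEMMAS AND PROOFS =====

-- kept-element count of A's loop over `rest` with state (even, pre): proof-side recursion
def kc (rest : List Int) (even : Bool) (pre : Int) : Int :=
  match rest with
  | [] => 0
  | x :: l =>
    if even then
      if x = pre then kc l even pre else 1 + kc l false x
    else 1 + kc l true x

lemma loop_eq_kc (rest : List Int) : ∀ (even : Bool) (pre ans : Int),
    minDeletion1Loop rest even pre ans = ans + (rest.length : Int) - kc rest even pre := by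
  induction rest with
  | nil => intro even pre ans; simp [minDeletion1Loop, kc]
  | cons x l ih =>
    intro even pre ans
    cases even with
    | false =>
      have h1 : minDeletion1Loop (x :: l) false pre ans = minDeletion1Loop l true x ans := by
        simp [minDeletion1Loop]
      have h2 : kc (x :: l) false pre = 1 + kc l true x := by simp [kc]
      rw [h1, h2, ih]
      simp only [List.length_cons]
      push_cast
      omega
    | true =>
      by_cases hx : x = pre
      · have h1 : minDeletion1Loop (x :: l) true pre ans = minDeletion1Loop l true pre (ans + 1) := by
          simp [minDeletion1Loop, hx]
        have h2 : kc (x :: l) true pre = kc l true pre := by simp [kc, hx]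
        rw [h1, h2, ih]
        simp only [List.length_cons]
        push_cast
        omega
      · have h1 : minDeletion1Loop (x :: l) true pre ans = minDeletion1Loop l false x ans := by
          simp [minDeletion1Loop, hx]
        have h2 : kc (x :: l) true pre = 1 + kc l false x := by simp [kc, hx]
        rw [h1, h2, ih]
        simp only [List.length_cons]
        push_cast
        omega

lemma kc_nonneg (rest : List Int) : ∀ (even : Bool) (pre : Int), 0 ≤ kc rest even pre := by
  induction rest with
  | nil => intro _ _; simp [kc]
  | cons x l ih =>
    intro even pre
    cases even with
    | false => have := ih true x; simp [kc]; omega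
    | true =>
      by_cases hx : x = pre
      · simpa [kc, hx] using ih true pre
      · have := ih false x; simp [kc, hx]; omega

-- proof-side recursive run-length encoding of a run (v, c) followed by l
def rleRec (v : Int) (c : Int) (l : List Int) : List (Int × Int) :=
  match l with
  | [] => [(v, c)]
  | x :: l' => if x = v then rleRec v (c + 1) l' else (v, c) :: rleRec x 1 l'

lemma foldl_rleStep (l : List Int) : ∀ (acc : List (Int × Int)) (v c : Int),
    List.foldl rleStep (acc ++ [(v, c)]) l = acc ++ rleRec v c l := by
  induction l with
  | nil => intro acc v c; simp [rleRec]
  | cons x l' ih =>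
    intro acc v c
    have hstep : rleStep (acc ++ [(v, c)]) x =
        if v = x then acc ++ [(v, c + 1)] else (acc ++ [(v, c)]) ++ [(x, 1)] := by
      simp [rleStep]
    by_cases hx : x = v
    · have hr : rleRec v c (x :: l') = rleRec v (c + 1) l' := by simp [rleRec, hx]
      rw [List.foldl_cons, hstep, if_pos hx.symm, hr, ih]
    · have hvx : ¬ v = x := fun h => hx h.symm
      have hr : rleRec v c (x :: l') = (v, c) :: rleRec x 1 l' := by simp [rleRec, hx]
      rw [List.foldl_cons, hstep, if_neg hvx, hr, ih (acc ++ [(v, c)]) x 1]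
      simp

-- kept-count of the fold over the runs of (v, c)·l, related to kc
lemma foldl_keptStep_rleRec (l : List Int) : ∀ (k v c : Int), 1 ≤ c →
    List.foldl keptStep k (rleRec v c l) =
      k + (if k % 2 = 0 then 1 + kc l true v
           else if c = 1 then 1 + kc l false v
           else 2 + kc l true v) := by
  induction l with
  | nil =>
    intro k v c hc
    simp only [rleRec, List.foldl_cons, List.foldl_nil, keptStep, beq_iff_eq, kc]
    simp only [min_def]
    split_ifs <;> omega
  | cons x l' ih =>
    intro k v c hc
    by_cases hx : x = v
    · have hr : rleRec v c (x :: l') = rleRec v (c + 1) l' := by simp [rleRec, hx]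
      subst hx
      rw [hr, ih k x (c + 1) (by omega)]
      have hkc1 : kc (x :: l') true x = kc l' true x := by simp [kc]
      have hkc2 : kc (x :: l') false x = 1 + kc l' true x := by simp [kc]
      rw [hkc1, hkc2]
      split_ifs <;> omega
    · have hr : rleRec v c (x :: l') = (v, c) :: rleRec x 1 l' := by simp [rleRec, hx]
      have hk : keptStep k (v, c) = if k % 2 = 0 then k + 1 else k + min c 2 := by
        simp [keptStep]
      rw [hr, List.foldl_cons, hk]
      have hkc1 : kc (x :: l') true v = 1 + kc l' false x := by simp [kc, hx]
      have hkc2 : kc (x :: l') false v = 1 + kc l' true x := by simp [kc]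
      by_cases hke : k % 2 = 0
      · rw [if_pos hke, ih (k + 1) x 1 le_rfl]
        rw [if_pos hke, hkc1]
        split_ifs <;> omega
      · rw [if_neg hke]
        simp only [min_def]
        rw [ih _ x 1 le_rfl]
        rw [if_neg hke, hkc1, hkc2]
        split_ifs <;> omega

-- ===== VERDICT =====
theorem minDeletion1_spec : Claim_equal_minDeletion1 := by
  unfold Claim_equal_minDeletion1
  intro nums _
  unfold Spec_minDeletion1 minDeletion1 minDeletion1_alt
  cases nums with
  | nil => simp
  | cons x rest =>
    simp only [List.foldl_cons]
    have h0 : rleStep [] x = [(x, 1)] := rfl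
    rw [h0, show ([(x, 1)] : List (Int × Int)) = [] ++ [(x, 1)] from rfl,
        foldl_rleStep rest [] x 1, List.nil_append,
        foldl_keptStep_rleRec rest 0 x 1 le_rfl, loop_eq_kc rest true x 0]
    have hnn := kc_nonneg rest true x
    simp only [beq_iff_eq, List.length_cons]
    push_cast
    split_ifs <;> omega
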